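-- pv_equiv track=rewrite | github.com/leandroblanco/trabajo_integrador | esp.py | decodificar_pam4
-- ===== SOURCE A (Python) =====
-- def decodificar_pam4(data):
--     simbolos = []
--     for b in data:
--         simbolos.append((b >> 6) & 0b11)
--         simbolos.append((b >> 4) & 0b11)
--         simbolos.append((b >> 2) & 0b11)
--         simbolos.append(b & 0b11)
--     return simbolos
-- ===== SOURCE B (Python) =====
-- TABLE = [[(b >> 6) & 3, (b >> 4) & 3, (b >> 2) & 3, b & 3] for b in range(256)]
--
--
-- def decodificar_pam4(data):
--     table = TABLE
--     return [s for b in data for s in table[b & 0xFF]]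
-- ===== Notes on version B (the rewrite author's own statement) =====
-- stated objective: idiomatic
-- what changed: B precomputes a 256-entry table of the four PAM4 symbols per byte value and builds the result with one flattening comprehension over data indexed by b & 0xFF, replacing A's per-byte shift-and-mask appends.
import Mathlib
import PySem

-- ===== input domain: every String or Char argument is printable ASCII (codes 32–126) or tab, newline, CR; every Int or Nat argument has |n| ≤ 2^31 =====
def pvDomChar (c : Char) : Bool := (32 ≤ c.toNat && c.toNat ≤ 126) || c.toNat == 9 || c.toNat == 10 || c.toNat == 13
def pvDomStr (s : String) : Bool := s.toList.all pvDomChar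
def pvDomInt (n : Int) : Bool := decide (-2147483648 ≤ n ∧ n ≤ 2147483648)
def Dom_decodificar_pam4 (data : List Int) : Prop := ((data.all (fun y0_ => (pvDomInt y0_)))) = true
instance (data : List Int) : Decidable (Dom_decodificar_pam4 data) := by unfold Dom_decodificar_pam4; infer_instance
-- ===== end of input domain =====

-- B replaces A's per-byte shift arithmetic with a 256-entry table built once and a
-- flattening pass that indexes it by b & 0xFF (idiomatic; same asymptotic cost).


-- ===== PORT A =====
-- for b in data: append (b>>6)&3, (b>>4)&3, (b>>2)&3, b&3
def decodificar_pam4 (data : List Int) : List Int :=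
  data.foldl (fun (simbolos : List Int) (b : Int) =>
    ((((simbolos ++ [PySem.Int.band (b >>> (6:Nat)) 3])
        ++ [PySem.Int.band (b >>> (4:Nat)) 3])
        ++ [PySem.Int.band (b >>> (2:Nat)) 3])
        ++ [PySem.Int.band b 3])) []

-- ===== PORT B =====
-- TABLE = [[(b>>6)&3, (b>>4)&3, (b>>2)&3, b&3] for b in range(256)]
def pvTable : List (List Int) :=
  (List.range 256).map (fun (n : Nat) =>
    [PySem.Int.band ((n : Int) >>> (6:Nat)) 3, PySem.Int.band ((n : Int) >>> (4:Nat)) 3,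
     PySem.Int.band ((n : Int) >>> (2:Nat)) 3, PySem.Int.band (n : Int) 3])

-- [s for b in data for s in table[b & 0xFF]]   (the index b & 0xFF is always in
-- 0..255, so the pyGetD default [] is never taken: the port is exact)
def decodificar_pam4_alt (data : List Int) : List Int :=
  data.flatMap (fun b => PySem.List.pyGetD pvTable (PySem.Int.band b 255) [])

-- ===== PRECONDITION & SPEC =====
def Spec_decodificar_pam4 (data : List Int) (out : List Int) : Prop := out = decodificar_pam4_alt data
instance (data : List Int) (out : List Int) : Decidable (Spec_decodificar_pam4 data out) := by unfold Spec_decodificar_pam4; infer_instance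

-- ===== CLAIM (what is proved, stated in full; the proofs are below) =====
def Claim_equal_decodificar_pam4 : Prop := ∀ (data : List Int), Dom_decodificar_pam4 data → Spec_decodificar_pam4 data (decodificar_pam4 data)

-- ===== LEMMAS AND PROOFS =====

-- b & 3 is b mod 4 (Python semantics on every Int, negatives included)
theorem pv_band_3 (b : Int) : PySem.Int.band b 3 = b % 4 := by
  unfold PySem.Int.band
  split_ifs with h h2 h2
  · have h3 : (3:Int).toNat = 3 := rfl
    rw [h3]
    have : b.toNat &&& 3 = b.toNat % 4 := Nat.and_two_pow_sub_one_eq_mod b.toNat 2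
    rw [this]; omega
  · omega
  · have h3 : (3:Int).toNat = 3 := rfl
    rw [h3]
    have : 3 &&& (-b - 1).toNat = (-b - 1).toNat % 4 := by
      rw [Nat.and_comm]; exact Nat.and_two_pow_sub_one_eq_mod _ 2
    rw [this]; omega
  · omega

-- b & 255 is b mod 256
theorem pv_band_255 (b : Int) : PySem.Int.band b 255 = b % 256 := by
  unfold PySem.Int.band
  split_ifs with h h2 h2
  · have h3 : (255:Int).toNat = 255 := rfl
    rw [h3]
    have : b.toNat &&& 255 = b.toNat % 256 := Nat.and_two_pow_sub_one_eq_mod b.toNat 8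
    rw [this]; omega
  · omega
  · have h3 : (255:Int).toNat = 255 := rfl
    rw [h3]
    have : 255 &&& (-b - 1).toNat = (-b - 1).toNat % 256 := by
      rw [Nat.and_comm]; exact Nat.and_two_pow_sub_one_eq_mod _ 8
    rw [this]; omega
  · omega

-- the four symbols of a byte depend only on b mod 256
theorem pv_shift_band (b : Int) (k : Nat) (hk : k < 7) :
    PySem.Int.band ((b % 256) >>> (k:Nat)) 3 = PySem.Int.band (b >>> k) 3 := by
  rw [pv_band_3, pv_band_3, Int.shiftRight_eq_div_pow, Int.shiftRight_eq_div_pow]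
  interval_cases k <;> push_cast <;> omega

-- table lookup at b & 0xFF yields exactly A's four symbols
theorem pv_block (b : Int) :
    PySem.List.pyGetD pvTable (PySem.Int.band b 255) []
      = [PySem.Int.band (b >>> (6:Nat)) 3, PySem.Int.band (b >>> (4:Nat)) 3,
         PySem.Int.band (b >>> (2:Nat)) 3, PySem.Int.band b 3] := by
  rw [pv_band_255]
  have hcast : b % 256 = ((b % 256).toNat : Int) := by omega
  have hlt : (b % 256).toNat < 256 := by omega
  have hsome : pvTable[(b % 256).toNat]?
      = some [PySem.Int.band (((b % 256).toNat : Int) >>> (6:Nat)) 3,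
              PySem.Int.band (((b % 256).toNat : Int) >>> (4:Nat)) 3,
              PySem.Int.band (((b % 256).toNat : Int) >>> (2:Nat)) 3,
              PySem.Int.band ((b % 256).toNat : Int) 3] := by
    unfold pvTable
    rw [List.getElem?_map, List.getElem?_range hlt]
    rfl
  rw [hcast, PySem.List.pyGetD_natCast, List.getD_eq_getElem?_getD, hsome]
  rw [Option.getD_some, ← hcast,
    pv_shift_band b 6 (by omega), pv_shift_band b 4 (by omega),
    pv_shift_band b 2 (by omega)]
  have h4 : (b % 256) % 4 = b % 4 := by omega
  rw [pv_band_3 (b % 256), pv_band_3 b, h4]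

-- ===== VERDICT (by name: the statement is the Claim_ definition above) =====
theorem decodificar_pam4_spec : Claim_equal_decodificar_pam4 := by
  intro data _
  unfold Spec_decodificar_pam4 decodificar_pam4 decodificar_pam4_alt
  simp only [List.append_assoc, List.singleton_append]
  have h := PySem.List.foldl_append_eq_flatMap
    (g := fun b : Int => [PySem.Int.band (b >>> (6:Nat)) 3, PySem.Int.band (b >>> (4:Nat)) 3,
                    PySem.Int.band (b >>> (2:Nat)) 3, PySem.Int.band b 3])
    (l := data) (acc := ([] : List Int))
  simp only [List.cons_append, List.nil_append] at h ⊢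
  rw [h]
  exact (List.flatMap_congr (fun b _ => pv_block b)).symm
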